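-- pv_equiv track=rewrite | github.com/krenak/BSI | 2023-1/prog2/exercicios/tenicas/08_circuito.py | palitos
-- ===== SOURCE A (Python) =====
-- def palitos(P, N, C, circuito):
-- 	palitos = 0
--
-- 	for i in range(P):
-- 		soma = 0
-- 		for j in range(N):
-- 			if circuito[j][i] == 0:
-- 				if soma >= C:
-- 					palitos += 1
-- 				soma = 0
-- 			else:
-- 				soma += 1
--
-- 		if soma >= C:
-- 			palitos += 1
--
-- 	return palitos
-- ===== SOURCE B (Python) =====
-- def palitos(P, N, C, circuito):
--     total = 0
--     for i in range(P):
--         col = [circuito[j][i] for j in range(N)]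
--         segs = [[]]
--         for x in col:
--             if x == 0:
--                 segs.append([])
--             else:
--                 segs[-1].append(x)
--         total += sum(1 for s in segs if len(s) >= C)
--     return total
-- ===== Notes on version B (the rewrite author's own statement) =====
-- stated objective: alternative
-- what changed: B materializes each column, splits it at zeros into an explicit list of segments (including the empty segments between/around consecutive zeros), and counts the segments of length >= C, replacing A's running counter with its mid-loop and end-of-column flushes.
import Mathlib
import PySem

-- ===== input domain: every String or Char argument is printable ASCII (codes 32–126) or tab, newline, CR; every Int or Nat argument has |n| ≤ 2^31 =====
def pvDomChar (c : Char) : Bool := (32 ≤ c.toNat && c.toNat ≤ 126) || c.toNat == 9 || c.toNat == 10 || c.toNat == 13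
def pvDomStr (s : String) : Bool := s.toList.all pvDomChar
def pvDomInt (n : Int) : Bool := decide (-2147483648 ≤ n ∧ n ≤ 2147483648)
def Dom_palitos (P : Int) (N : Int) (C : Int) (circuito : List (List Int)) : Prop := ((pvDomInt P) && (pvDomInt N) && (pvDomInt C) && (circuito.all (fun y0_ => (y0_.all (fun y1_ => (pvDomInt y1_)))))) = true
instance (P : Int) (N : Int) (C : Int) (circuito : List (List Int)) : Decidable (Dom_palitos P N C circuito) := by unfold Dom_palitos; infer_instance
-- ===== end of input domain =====

-- B replaces A's running counter (with mid-loop and end-of-column flushes) by materializing each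
-- column, splitting it at zeros into an explicit list of segments (empty ones included) and
-- counting the segments of length ≥ C; same cost, different decomposition (objective: alternative).

-- ===== PORT A =====
def palitos (P : Int) (N : Int) (C : Int) (circuito : List (List Int)) : Int :=
  (PySem.List.pyRange 0 P 1).foldl (fun pal i =>
    let st := (PySem.List.pyRange 0 N 1).foldl
      (fun (st : Int × Int) j =>
        if PySem.List.pyGetD (PySem.List.pyGetD circuito j []) i 0 = 0 then
          (if st.2 ≥ C then st.1 + 1 else st.1, 0)
        else
          (st.1, st.2 + 1))
      (pal, 0)
    if st.2 ≥ C then st.1 + 1 else st.1) 0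

-- ===== PORT B =====
def palitos_alt (P : Int) (N : Int) (C : Int) (circuito : List (List Int)) : Int :=
  (PySem.List.pyRange 0 P 1).foldl (fun total i =>
    let col := (PySem.List.pyRange 0 N 1).map
      (fun j => PySem.List.pyGetD (PySem.List.pyGetD circuito j []) i 0)
    let segs := col.foldl
      (fun (segs : List (List Int)) x =>
        if x = 0 then segs ++ [[]]
        else segs.dropLast ++ [segs.getLastD [] ++ [x]])
      [[]]
    total + ((segs.filter (fun s => C ≤ (s.length : Int))).length : Int)) 0

-- ===== PRECONDITION & SPEC =====
-- Pre_ = exactly the inputs where Python A returns (no IndexError): either no column is read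
-- (P ≤ 0) or the first N rows exist and each has at least P entries.
def Pre_palitos (P : Int) (N : Int) (C : Int) (circuito : List (List Int)) : Prop :=
  P ≤ 0 ∨ (N ≤ (circuito.length : Int) ∧ ∀ row ∈ circuito.take N.toNat, P ≤ (row.length : Int))
instance (P : Int) (N : Int) (C : Int) (circuito : List (List Int)) : Decidable (Pre_palitos P N C circuito) := by unfold Pre_palitos; infer_instance

def pvWitness_palitos : Int × Int × Int × List (List Int) := (1, 2, 1, [[1], [0]])

def Spec_palitos (P : Int) (N : Int) (C : Int) (circuito : List (List Int)) (out : Int) : Prop := out = palitos_alt P N C circuito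
instance (P : Int) (N : Int) (C : Int) (circuito : List (List Int)) (out : Int) : Decidable (Spec_palitos P N C circuito out) := by unfold Spec_palitos; infer_instance

-- ===== CLAIM (what is proved, stated in full; the proofs are below) =====
def Claim_equal_palitos : Prop := ∀ (P : Int) (N : Int) (C : Int) (circuito : List (List Int)), Dom_palitos P N C circuito → Pre_palitos P N C circuito → Spec_palitos P N C circuito (palitos P N C circuito)

-- ===== LEMMAS AND PROOFS =====

-- proof-only helpers: A's loop body / flush, B's segment builder / segment counter
def pvStepA (C : Int) (st : Int × Int) (x : Int) : Int × Int :=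
  if x = 0 then (if st.2 ≥ C then st.1 + 1 else st.1, 0) else (st.1, st.2 + 1)

def pvFlush (C : Int) (st : Int × Int) : Int :=
  if st.2 ≥ C then st.1 + 1 else st.1

def pvStepB (segs : List (List Int)) (x : Int) : List (List Int) :=
  if x = 0 then segs ++ [[]] else segs.dropLast ++ [segs.getLastD [] ++ [x]]

def pvCnt (C : Int) (segs : List (List Int)) : Int :=
  ((segs.filter (fun s => C ≤ (s.length : Int))).length : Int)

theorem pvStepB_ne_nil (segs : List (List Int)) (x : Int) : pvStepB segs x ≠ [] := by
  unfold pvStepB; split_ifs <;> simp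

theorem pvFoldB_append (xs : List Int) (pre segs : List (List Int)) (h : segs ≠ []) :
    xs.foldl pvStepB (pre ++ segs) = pre ++ xs.foldl pvStepB segs := by
  induction xs generalizing segs with
  | nil => rfl
  | cons x xs ih =>
    have hstep : pvStepB (pre ++ segs) x = pre ++ pvStepB segs x := by
      unfold pvStepB
      split_ifs with hx
      · simp
      · rw [List.dropLast_append_of_ne_nil h,
          List.getLastD_eq_getLast?, List.getLastD_eq_getLast?, List.getLast?_append_of_ne_nil _ h]
        simp
    simp only [List.foldl_cons, hstep, ih _ (pvStepB_ne_nil segs x)]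

theorem pvCnt_append (C : Int) (s t : List (List Int)) :
    pvCnt C (s ++ t) = pvCnt C s + pvCnt C t := by
  unfold pvCnt; rw [List.filter_append, List.length_append]; push_cast; ring

theorem pvMain (C : Int) (xs : List Int) (cur : List Int) (pal : Int) :
    pvFlush C (xs.foldl (pvStepA C) (pal, (cur.length : Int)))
      = pal + pvCnt C (xs.foldl pvStepB [cur]) := by
  induction xs generalizing cur pal with
  | nil =>
    unfold pvFlush pvCnt
    simp only [List.foldl_nil]
    by_cases h : C ≤ (cur.length : Int)
    · rw [if_pos (by omega)]; simp [List.filter, h]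
    · rw [if_neg (by omega)]; simp [List.filter, h]
  | cons x xs ih =>
    by_cases hx : x = 0
    · have hA : pvStepA C (pal, (cur.length : Int)) x
          = (pvFlush C (pal, (cur.length : Int)), (([] : List Int).length : Int)) := by
        simp [pvStepA, pvFlush, hx]
      have hB : pvStepB [cur] x = [cur] ++ [[]] := by simp [pvStepB, hx]
      rw [List.foldl_cons, hA, ih, List.foldl_cons, hB,
        pvFoldB_append xs [cur] [[]] (by simp), pvCnt_append]
      unfold pvFlush pvCnt
      by_cases h : C ≤ (cur.length : Int)
      · rw [if_pos (by omega)]; simp [List.filter, h, add_assoc]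
      · rw [if_neg (by omega)]; simp [List.filter, h]
    · have hA : pvStepA C (pal, (cur.length : Int)) x
          = (pal, ((cur ++ [x]).length : Int)) := by
        simp [pvStepA, hx]
      have hB : pvStepB [cur] x = [cur ++ [x]] := by simp [pvStepB, hx]
      rw [List.foldl_cons, hA, ih, List.foldl_cons, hB]

-- ===== VERDICT (by name: the statement is the Claim_ definition above) =====
theorem pvKey (N C : Int) (g : Int → Int) (acc : Int) :
    pvFlush C ((PySem.List.pyRange 0 N 1).foldl (fun st j => pvStepA C st (g j)) (acc, 0))
      = acc + pvCnt C (((PySem.List.pyRange 0 N 1).map g).foldl pvStepB [[]]) := by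
  rw [← List.foldl_map]
  have h0 : (0 : Int) = (([] : List Int).length : Int) := by simp
  rw [h0, pvMain]

theorem palitos_spec : Claim_equal_palitos := by
  intro P N C circuito _ _
  unfold Spec_palitos palitos palitos_alt
  congr 1
  funext acc i
  exact pvKey N C (fun j => PySem.List.pyGetD (PySem.List.pyGetD circuito j []) i 0) acc
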